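-- pv_equiv track=rewrite | github.com/zzammz/MKcode | 2-Quizzes/Codility/Lesson-04d/L4d_MissingInteger.py | L4d_MissingInteger2
-- ===== SOURCE A (Python) =====
-- def L4d_MissingInteger2 (p_array):
--     p_array.sort()
--     array_len = len(p_array)
--     if max(p_array) != array_len:
--         return 0
--
--     for ictr in range (0, array_len):
--         if p_array[ictr] == ictr+1:
--             continue
--         else:
--             return 0
--     return 1
-- ===== SOURCE B (Python) =====
-- def L4d_MissingInteger2(p_array):
--     n = len(p_array)
--     return 1 if set(p_array) == set(range(1, n + 1)) else 0
-- ===== Notes on version B (the rewrite author's own statement) =====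
-- stated objective: simpler
-- what changed: Replaces the in-place sort, max guard and indexed scan with a single set comparison set(p_array) == set(range(1, n+1)); no sort, no index loop, and B does not mutate its argument (the equivalence is about the return value only).
import Mathlib
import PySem

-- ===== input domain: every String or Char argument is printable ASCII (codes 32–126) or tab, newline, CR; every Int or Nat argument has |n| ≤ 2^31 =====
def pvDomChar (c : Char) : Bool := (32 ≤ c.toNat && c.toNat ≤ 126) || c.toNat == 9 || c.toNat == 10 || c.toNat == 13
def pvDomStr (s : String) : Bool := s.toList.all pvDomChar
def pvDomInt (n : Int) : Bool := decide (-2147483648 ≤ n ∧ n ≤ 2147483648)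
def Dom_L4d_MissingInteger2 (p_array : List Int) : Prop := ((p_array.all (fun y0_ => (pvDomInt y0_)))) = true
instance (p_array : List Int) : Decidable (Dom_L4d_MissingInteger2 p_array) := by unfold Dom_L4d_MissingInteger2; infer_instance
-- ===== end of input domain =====

-- B replaces A's in-place sort + max guard + indexed scan by a single set comparison (simpler, no sort);
-- equivalence is about the RETURN value only: A sorts its argument in place, B does not mutate it.

-- ===== PORT A =====
def pvALoop (p : List Int) : List Int → Int
  | [] => 1
  | ictr :: rest =>
      if PySem.List.pyGet? p ictr = some (ictr + 1) then pvALoop p rest else 0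

def L4d_MissingInteger2 (p_array : List Int) : Int :=
  let p := PySem.List.sorted p_array (fun x => x) false
  let array_len : Int := p.length
  match PySem.List.max? p (fun x => x) with
  | none => 0  -- Python raises ValueError here (empty list); excluded by Pre_
  | some m => if m ≠ array_len then 0 else pvALoop p (PySem.List.pyRange 0 array_len 1)

-- ===== PORT B =====
def L4d_MissingInteger2_alt (p_array : List Int) : Int :=
  let n : Int := p_array.length
  if PySem.Set.equal (PySem.Set.ofList p_array)
      (PySem.Set.ofList (PySem.List.pyRange 1 (n + 1) 1)) then 1 else 0

-- ===== PRECONDITION & SPEC =====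
-- Pre_ excludes only the empty list, on which Python A raises ValueError (max() of an empty sequence).
def Pre_L4d_MissingInteger2 (p_array : List Int) : Prop := p_array ≠ []
instance (p_array : List Int) : Decidable (Pre_L4d_MissingInteger2 p_array) := by
  unfold Pre_L4d_MissingInteger2; infer_instance

def pvWitness_L4d_MissingInteger2 : List Int := [2, 1, 3]

def Spec_L4d_MissingInteger2 (p_array : List Int) (out : Int) : Prop := out = L4d_MissingInteger2_alt p_array
instance (p_array : List Int) (out : Int) : Decidable (Spec_L4d_MissingInteger2 p_array out) := by unfold Spec_L4d_MissingInteger2; infer_instance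

-- ===== CLAIM (what is proved, stated in full; the proofs are below) =====
def Claim_equal_L4d_MissingInteger2 : Prop := ∀ (p_array : List Int), Dom_L4d_MissingInteger2 p_array → Pre_L4d_MissingInteger2 p_array → Spec_L4d_MissingInteger2 p_array (L4d_MissingInteger2 p_array)

-- ===== LEMMAS AND PROOFS =====

lemma pvALoop_eq_one (p : List Int) (idx : List Int)
    (h : ∀ i ∈ idx, PySem.List.pyGet? p i = some (i + 1)) : pvALoop p idx = 1 := by
  induction idx with
  | nil => rfl
  | cons i rest ih =>
      simp [pvALoop, h i (by simp)]
      exact ih (fun j hj => h j (by simp [hj]))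

lemma pvALoop_eq_zero (p : List Int) (idx : List Int)
    (h : ∃ i ∈ idx, PySem.List.pyGet? p i ≠ some (i + 1)) : pvALoop p idx = 0 := by
  induction idx with
  | nil => simp at h
  | cons i rest ih =>
      by_cases hi : PySem.List.pyGet? p i = some (i + 1)
      · simp [pvALoop, hi]
        rcases h with ⟨j, hj, hne⟩
        rcases List.mem_cons.mp hj with rfl | hj
        · exact absurd hi hne
        · exact ih ⟨j, hj, hne⟩
      · simp [pvALoop, hi]

-- Set equality with {1..n} is the same test as "sorted p = [1..n]".
lemma pv_perm_test (p : List Int) :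
    (∀ x : Int, x ∈ p ↔ x ∈ PySem.List.pyRange 1 ((p.length : Int) + 1) 1) ↔
      PySem.List.sorted p (fun x => x) false = PySem.List.pyRange 1 ((p.length : Int) + 1) 1 := by
  constructor
  · intro h
    have hsub : (PySem.List.pyRange 1 ((p.length : Int) + 1) 1) ⊆ p := fun x hx => (h x).mpr hx
    have hsp := List.subperm_of_subset (PySem.List.nodup_pyRange_one 1 _) hsub
    have hlen : p.length ≤ (PySem.List.pyRange 1 ((p.length : Int) + 1) 1).length := by
      rw [PySem.List.length_pyRange_one]; omega
    exact PySem.List.sorted_eq_of_perm_of_pairwise_lt p _ (fun x => x)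
      (List.Subperm.perm_of_length_le hsp hlen) (PySem.List.pairwise_lt_pyRange_one 1 _)
  · intro h x
    rw [← PySem.List.mem_sorted p (fun x => x) false, h]

-- A equals "sorted p = [1..n]" (the permutation test), for nonempty p.
lemma pvA_eq (p_array : List Int) (hne : p_array ≠ []) :
    L4d_MissingInteger2 p_array =
      if PySem.List.sorted p_array (fun x => x) false
          = PySem.List.pyRange 1 ((p_array.length : Int) + 1) 1 then 1 else 0 := by
  set s := PySem.List.sorted p_array (fun x => x) false with hs
  set n := p_array.length with hn
  have hslen : s.length = n := PySem.List.length_sorted p_array (fun x => x) false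
  have hsne : s ≠ [] := by
    intro h0; exact hne ((PySem.List.sorted_eq_nil_iff p_array (fun x => x) false).mp h0)
  have hA : L4d_MissingInteger2 p_array =
      (match PySem.List.max? s (fun x => x) with
       | none => (0 : Int)
       | some m => if m ≠ (n : Int) then 0
           else pvALoop s (PySem.List.pyRange 0 (n : Int) 1)) := by
    simp only [L4d_MissingInteger2, ← hs, hslen]
  by_cases hR : s = PySem.List.pyRange 1 ((n : Int) + 1) 1
  · -- sorted p is exactly [1..n]: max is n, guard passes, scan succeeds
    have hnpos : 1 ≤ n := by
      cases p_array with
      | nil => exact absurd rfl hne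
      | cons a t => simp [hn]
    cases hm : PySem.List.max? s (fun x => x) with
    | none => exact absurd ((PySem.List.max?_eq_none_iff s (fun x => x)).mp hm) hsne
    | some m =>
        have hmem : m ∈ s := PySem.List.max?_mem hm
        have hm_le : m < (n : Int) + 1 := by
          rw [hR] at hmem; exact (PySem.List.mem_pyRange_one.mp hmem).2
        have hn_le : (n : Int) ≤ m := by
          refine PySem.List.max?_isMax hm (n : Int) ?_
          rw [hR]; exact PySem.List.mem_pyRange_one.mpr ⟨by exact_mod_cast hnpos, by omega⟩
        rw [hA, hm]
        simp only [if_neg (by omega : ¬ m ≠ (n : Int)), if_pos hR]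
        refine pvALoop_eq_one _ _ (fun i hi => ?_)
        have hib := PySem.List.mem_pyRange_one.mp hi
        rw [hR, PySem.List.pyGet?_of_nonneg _ hib.1, PySem.List.getElem?_pyRange_one]
        rw [if_pos (by omega)]
        congr 1
        omega
  · -- sorted p is not [1..n]: the guard or the scan fails
    rw [hA, if_neg hR]
    cases hm : PySem.List.max? s (fun x => x) with
    | none => rfl
    | some m =>
        by_cases hmn : m = (n : Int)
        · simp only [if_neg (by omega : ¬ m ≠ (n : Int))]
          refine pvALoop_eq_zero _ _ ?_
          by_contra hall
          push Not at hall
          apply hR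
          apply List.ext_getElem
          · rw [hslen, PySem.List.length_pyRange_one]; omega
          · intro k hk1 hk2
            have hkn : k < n := by rwa [hslen] at hk1
            have hmemk : (k : Int) ∈ PySem.List.pyRange 0 (n : Int) 1 :=
              PySem.List.mem_pyRange_one.mpr ⟨by omega, by exact_mod_cast hkn⟩
            have hk := hall (k : Int) hmemk
            rw [PySem.List.pyGet?_of_nonneg _ (by omega)] at hk
            simp only [Int.toNat_natCast] at hk
            rw [List.getElem?_eq_getElem hk1] at hk
            have hsk : s[k] = (k : Int) + 1 := Option.some_injective _ hk
            rw [hsk, PySem.List.getElem_pyRange_one]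
            omega
        · simp only [if_pos (by omega : m ≠ (n : Int))]

-- B equals the same test.
lemma pvB_eq (p_array : List Int) :
    L4d_MissingInteger2_alt p_array =
      if PySem.List.sorted p_array (fun x => x) false
          = PySem.List.pyRange 1 ((p_array.length : Int) + 1) 1 then 1 else 0 := by
  unfold L4d_MissingInteger2_alt
  have hiff : (PySem.Set.equal (PySem.Set.ofList p_array)
      (PySem.Set.ofList (PySem.List.pyRange 1 ((p_array.length : Int) + 1) 1)) = true) ↔
      PySem.List.sorted p_array (fun x => x) false
        = PySem.List.pyRange 1 ((p_array.length : Int) + 1) 1 := by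
    rw [PySem.Set.equal_iff]
    simp only [PySem.Set.mem_ofList]
    exact pv_perm_test p_array
  simp only []
  split_ifs with h1 h2 h2
  · rfl
  · exact absurd (hiff.mp h1) h2
  · exact absurd (hiff.mpr h2) h1
  · rfl

-- ===== VERDICT (by name: the statement is the Claim_ definition above) =====
theorem L4d_MissingInteger2_spec : Claim_equal_L4d_MissingInteger2 := by
  intro p _ hpre
  unfold Spec_L4d_MissingInteger2
  rw [pvA_eq p hpre, pvB_eq p]
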